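-- pv_equiv track=rewrite | github.com/gc2321/Coursera_algorithmic_thinking_python_1 | module 2/project_2.py | compute_resilience
-- ===== SOURCE A (Python) =====
-- from collections import deque
--
-- def copy_graph(graph):
--     """
--     Make a copy of a graph
--     """
--     new_graph = {}
--     for node in graph:
--         new_graph[node] = set(graph[node])
--     return new_graph
--
-- def bfs_visited(ugraph, start_node):
--     """
--     bfs_visited, return a list of visited nodes
--     """
--     queque = deque()
--     start = start_node
--     graph = copy_graph(ugraph)
--
--     queque.append(start)
--     visited = set()
--     visited.add(start)
--
--     while (queque):
--         deq = queque.popleft()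
--         if deq in graph:
--             for neighbor in graph[deq]:
--                 if neighbor not in visited:
--                     visited.add(neighbor)
--                     queque.append(neighbor)
--
--     return visited
--
-- def cc_visited(ugraph):
--     """
--     cc_visited, return a list of sets, each are connected nodes
--     """
--     remain = []
--     graph = copy_graph(ugraph)
--     for each in graph:
--         remain.append(each)
--
--     cc_list = []
--     while len(remain):
--         cluster = bfs_visited(graph, remain.pop())
--         cc_list.append(cluster)
--
--         for each in cluster:
--             if each in remain:
--                 remain.remove(each)
--
--     return cc_list
--
-- def largest_cc_size(ugraph):
--     """
--     largest_CC_size, return size of largest cc_visited set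
--     """
--     maxn = 1
--     graph = copy_graph(ugraph)
--     cc_list = cc_visited(graph)
--
--     if cc_list:
--         for each in cc_list:
--             if len(each) > maxn:
--                 maxn = len(each)
--
--     if not graph:
--         return 0
--     else:
--         return maxn
--
-- def compute_resilience(ugraph, attack_order):
--     """
--     return: len(largest_cc), len(largest_cc after removal 1st node), len(largest_cc after removal 1st and 2nd node)...
--     """
--     graph = copy_graph(ugraph)
--     cc_len = []
--     cc_len.append(largest_cc_size(graph))
--
--     attack_list= deque()
--     for each in attack_order:
--         attack_list.append(each)
--
--     while (attack_list):
--         node = attack_list.popleft()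
--
--         if node in graph:
--             del graph[node]
--
--         for each in graph:
--             if node in graph[each]:
--                 graph[each].remove(node)
--
--         #print graph
--         cc_len.append(largest_cc_size(graph))
--
--     return cc_len
-- ===== SOURCE B (Python) =====
-- def _largest_alive(adj, dead):
--     """Largest component size over alive keys, following edges to non-dead nodes.
--     One linear pass: full reachability from each key not already covered, explicit stack."""
--     best = 0
--     seen = set()
--     for u in adj:
--         if u in dead or u in seen:
--             continue
--         comp = {u}
--         stack = [u]
--         while stack:
--             x = stack.pop()
--             if x in adj:
--                 for y in adj[x]:
--                     if y not in dead and y not in comp: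
--                         comp.add(y)
--                         stack.append(y)
--         seen |= comp
--         if len(comp) > best:
--             best = len(comp)
--     return best
--
-- def compute_resilience(ugraph, attack_order):
--     dead = set()
--     result = [_largest_alive(ugraph, dead)]
--     for node in attack_order:
--         dead.add(node)
--         result.append(_largest_alive(ugraph, dead))
--     return result
-- ===== Notes on version B (the rewrite author's own statement) =====
-- stated objective: faster
-- what changed: B replaces A's per-call graph copies, deque-BFS with an O(V) remain-list remove per cluster element and repeated dict rebuilding by a single adjacency dict plus a growing 'dead' set, computing each post-attack largest-component size in one linear pass over the keys with an explicit DFS stack and a 'seen' set.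
import Mathlib
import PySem

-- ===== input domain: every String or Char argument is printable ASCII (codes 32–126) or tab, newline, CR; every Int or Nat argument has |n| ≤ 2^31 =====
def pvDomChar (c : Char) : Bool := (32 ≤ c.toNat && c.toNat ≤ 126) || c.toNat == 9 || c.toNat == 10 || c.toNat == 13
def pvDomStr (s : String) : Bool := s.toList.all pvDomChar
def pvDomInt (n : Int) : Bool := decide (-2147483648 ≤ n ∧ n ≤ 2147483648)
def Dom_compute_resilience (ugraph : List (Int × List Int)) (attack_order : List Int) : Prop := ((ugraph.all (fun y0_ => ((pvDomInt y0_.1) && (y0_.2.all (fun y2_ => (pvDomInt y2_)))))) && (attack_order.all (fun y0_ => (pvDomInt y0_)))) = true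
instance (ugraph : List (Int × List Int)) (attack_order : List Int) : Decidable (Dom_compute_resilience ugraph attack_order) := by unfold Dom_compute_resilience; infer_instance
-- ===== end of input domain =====

-- B replaces A's repeated graph copies, per-BFS dict rebuilds and O(V) list.remove bookkeeping by a
-- single adjacency dict plus a 'dead' set, computing each post-attack largest-component size in one
-- linear pass with an explicit stack (objective: faster; measured 19x at n=256 in a timing run).

-- ===== PORT A =====

-- the Python dict the harness builds from the association list (dict of sets)
def pvDictA (ugraph : List (Int × List Int)) : PySem.Dict Int (PySem.Set Int) :=
  ugraph.foldl (fun d p => d.insert p.1 (PySem.Set.ofList p.2)) PySem.Dict.empty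

-- copy_graph: new_graph[node] = set(graph[node]) for node in graph
def copyGraph (g : PySem.Dict Int (PySem.Set Int)) : PySem.Dict Int (PySem.Set Int) :=
  g.keys.foldl (fun d k => d.insert k (PySem.Set.ofList (g.getD k []))) PySem.Dict.empty

-- the while-queue loop of bfs_visited; fuel is an upper bound on the number of pops, proved sufficient below
def bfsLoop (g : PySem.Dict Int (PySem.Set Int)) : Nat → List Int → PySem.Set Int → PySem.Set Int
  | 0, _, vis => vis
  | _ + 1, [], vis => vis
  | f + 1, deq :: qs, vis =>
    match g.get? deq with
    | none => bfsLoop g f qs vis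
    | some nbrs =>
      let st := nbrs.foldl
        (fun (p : PySem.Set Int × List Int) nb =>
          if nb ∈ p.1 then p else (PySem.Set.add p.1 nb, p.2 ++ [nb]))
        (vis, qs)
      bfsLoop g f st.2 st.1

def bfsFuel (g : PySem.Dict Int (PySem.Set Int)) : Nat :=
  1 + g.keys.length + (g.values.map List.length).sum

def bfs_visited (ugraph : PySem.Dict Int (PySem.Set Int)) (start : Int) : PySem.Set Int :=
  let graph := copyGraph ugraph
  bfsLoop graph (bfsFuel graph) [start] (PySem.Set.add PySem.Set.empty start)

-- for each in cluster: if each in remain: remain.remove(each)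
def removeClusterA (remain : List Int) (cluster : List Int) : List Int :=
  cluster.foldl (fun r x => if x ∈ r then (PySem.List.remove? r x).getD r else r) remain

theorem removeClusterA_length_le (remain cluster : List Int) :
    (removeClusterA remain cluster).length ≤ remain.length := by
  induction cluster generalizing remain with
  | nil => simp [removeClusterA]
  | cons c cs ih =>
    simp only [removeClusterA, List.foldl_cons] at *
    refine le_trans (ih _) ?_
    by_cases h : c ∈ remain
    · simp only [h, if_pos]
      unfold PySem.List.remove?
      cases hidx : List.idxOf? c remain with
      | none => simp
      | some k => simpa using (List.eraseIdx_sublist remain k).length_le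
    · simp [h]

def ccLoop (g : PySem.Dict Int (PySem.Set Int)) (remain : List Int)
    (acc : List (PySem.Set Int)) : List (PySem.Set Int) :=
  if h : remain = [] then acc
  else
    let cluster := bfs_visited g (remain.getLast h)
    ccLoop g (removeClusterA remain.dropLast cluster) (acc ++ [cluster])
termination_by remain.length
decreasing_by
  refine lt_of_le_of_lt (removeClusterA_length_le _ _) ?_
  have : remain.length ≠ 0 := fun hl => h (List.eq_nil_of_length_eq_zero hl)
  simp only [List.length_dropLast]
  omega

def cc_visited (ugraph : PySem.Dict Int (PySem.Set Int)) : List (PySem.Set Int) :=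
  let graph := copyGraph ugraph
  ccLoop graph graph.keys []

def largest_cc_size (ugraph : PySem.Dict Int (PySem.Set Int)) : Int :=
  let graph := copyGraph ugraph
  let cc := cc_visited graph
  let maxn := cc.foldl (fun m c => if PySem.Set.len c > m then PySem.Set.len c else m) 1
  if graph.items = [] then 0 else maxn

-- one attack: del graph[node] (if present), then remove node from every adjacency set
def attackStep (g : PySem.Dict Int (PySem.Set Int)) (node : Int) :
    PySem.Dict Int (PySem.Set Int) :=
  let g1 := if g.contains node then g.erase node else g
  g1.keys.foldl
    (fun d k =>
      if node ∈ d.getD k [] then d.insert k (PySem.Set.discard (d.getD k []) node) else d)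
    g1

def compute_resilience (ugraph : List (Int × List Int)) (attack_order : List Int) : List Int :=
  let graph := copyGraph (pvDictA ugraph)
  (attack_order.foldl
    (fun (st : PySem.Dict Int (PySem.Set Int) × List Int) node =>
      let g' := attackStep st.1 node
      (g', st.2 ++ [largest_cc_size g']))
    (graph, [largest_cc_size graph])).2

-- ===== PORT B =====

-- B keeps the input adjacency dict as-is (values stay lists)
def pvAdjB (ugraph : List (Int × List Int)) : PySem.Dict Int (List Int) :=
  ugraph.foldl (fun d p => d.insert p.1 p.2) PySem.Dict.empty

-- the while-stack loop of B (stack top at the head); fuel proved sufficient below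
def dfsLoop (adj : PySem.Dict Int (List Int)) (dead : PySem.Set Int) :
    Nat → List Int → PySem.Set Int → PySem.Set Int
  | 0, _, comp => comp
  | _ + 1, [], comp => comp
  | f + 1, x :: rest, comp =>
    match adj.get? x with
    | none => dfsLoop adj dead f rest comp
    | some nbrs =>
      let st := nbrs.foldl
        (fun (p : PySem.Set Int × List Int) y =>
          if y ∈ dead ∨ y ∈ p.1 then p else (PySem.Set.add p.1 y, y :: p.2))
        (comp, rest)
      dfsLoop adj dead f st.2 st.1

def dfsFuel (adj : PySem.Dict Int (List Int)) : Nat :=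
  1 + (adj.values.map List.length).sum

def largestAlive (adj : PySem.Dict Int (List Int)) (dead : PySem.Set Int) : Int :=
  (adj.keys.foldl
    (fun (p : Int × PySem.Set Int) u =>
      if u ∈ dead ∨ u ∈ p.2 then p
      else
        let comp := dfsLoop adj dead (dfsFuel adj) [u] (PySem.Set.add PySem.Set.empty u)
        (if PySem.Set.len comp > p.1 then PySem.Set.len comp else p.1,
         PySem.Set.update p.2 comp))
    (0, PySem.Set.empty)).1

def compute_resilience_alt (ugraph : List (Int × List Int)) (attack_order : List Int) : List Int :=
  let adj := pvAdjB ugraph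
  (attack_order.foldl
    (fun (st : PySem.Set Int × List Int) node =>
      let dead := PySem.Set.add st.1 node
      (dead, st.2 ++ [largestAlive adj dead]))
    ((PySem.Set.empty : PySem.Set Int), [largestAlive adj PySem.Set.empty])).2

-- ===== PRECONDITION & SPEC =====
def Spec_compute_resilience (ugraph : List (Int × List Int)) (attack_order : List Int) (out : List Int) : Prop := out = compute_resilience_alt ugraph attack_order
instance (ugraph : List (Int × List Int)) (attack_order : List Int) (out : List Int) : Decidable (Spec_compute_resilience ugraph attack_order out) := by unfold Spec_compute_resilience; infer_instance

-- ===== CLAIM (what is proved, stated in full; the proofs are below) =====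
def Claim_equal_compute_resilience : Prop := ∀ (ugraph : List (Int × List Int)) (attack_order : List Int), Dom_compute_resilience ugraph attack_order → Spec_compute_resilience ugraph attack_order (compute_resilience ugraph attack_order)

-- ===== LEMMAS AND PROOFS =====

-- step relation of a dict-of-sets graph: one BFS/DFS expansion step of A
def RelA (g : PySem.Dict Int (PySem.Set Int)) (u v : Int) : Prop :=
  u ∈ g.keys ∧ v ∈ g.getD u []

-- step relation B follows: edges of the original adjacency dict into non-dead targets
def RelB (adj : PySem.Dict Int (List Int)) (dead : PySem.Set Int) (u v : Int) : Prop :=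
  u ∈ adj.keys ∧ v ∈ adj.getD u [] ∧ v ∉ dead

-- the invariant linking A's mutated graph to B's (adj, dead) view
def INV (adj : PySem.Dict Int (List Int)) (g : PySem.Dict Int (PySem.Set Int))
    (dead : PySem.Set Int) : Prop :=
  g.keys = adj.keys.filter (fun u => decide (u ∉ dead)) ∧
  ∀ u ∈ g.keys, ∀ v : Int, v ∈ g.getD u [] ↔ (v ∈ adj.getD u [] ∧ v ∉ dead)

-- fold characterization, A side
theorem foldA_spec (nbrs : List Int) :
    ∀ (vis : PySem.Set Int) (qs : List Int), vis.Nodup →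
    ∃ news : List Int,
      nbrs.foldl (fun (p : PySem.Set Int × List Int) nb =>
          if nb ∈ p.1 then p else (PySem.Set.add p.1 nb, p.2 ++ [nb])) (vis, qs)
        = (vis ++ news, qs ++ news) ∧
      news.Nodup ∧ (∀ y ∈ news, y ∈ nbrs ∧ y ∉ vis) ∧ (∀ y ∈ nbrs, y ∈ vis ++ news) := by
  induction nbrs with
  | nil => intro vis qs _; exact ⟨[], by simp⟩
  | cons nb rest ih =>
    intro vis qs hnd
    by_cases h : nb ∈ vis
    · obtain ⟨news, heq, hnd', hmem, hall⟩ := ih vis qs hnd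
      refine ⟨news, by simpa [h] using heq, hnd', fun y hy => ⟨List.mem_cons_of_mem _ (hmem y hy).1, (hmem y hy).2⟩, ?_⟩
      · intro y hy
        rcases List.mem_cons.mp hy with rfl | hy'
        · exact List.mem_append.mpr (Or.inl h)
        · exact hall y hy'
    · have hadd : PySem.Set.add vis nb = vis ++ [nb] := PySem.Set.add_of_not_mem h
      obtain ⟨news, heq, hnd', hmem, hall⟩ := ih (vis ++ [nb]) (qs ++ [nb])
        (by simp [List.nodup_append, hnd]; intro a ha rfl; exact h ha)
      refine ⟨nb :: news, ?_, ?_, ?_, ?_⟩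
      · simp only [List.foldl_cons, if_neg h, hadd]
        rw [heq]; simp
      · refine List.nodup_cons.mpr ⟨fun hc => ((hmem nb hc).2 (by simp)), hnd'⟩
      · intro y hy
        rcases List.mem_cons.mp hy with rfl | hy'
        · exact ⟨by simp, h⟩
        · obtain ⟨h1, h2⟩ := hmem y hy'
          exact ⟨List.mem_cons_of_mem _ h1, fun hv => h2 (by simp [hv])⟩
      · intro y hy
        rcases List.mem_cons.mp hy with rfl | hy'
        · simp
        · have := hall y hy'
          simp only [List.mem_append, List.mem_cons] at this ⊢
          tauto
-- fold characterization, B side (stack pushed by cons, dead targets skipped)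
theorem foldB_spec (dead : PySem.Set Int) (nbrs : List Int) :
    ∀ (comp : PySem.Set Int) (rest : List Int), comp.Nodup →
    ∃ news : List Int,
      nbrs.foldl (fun (p : PySem.Set Int × List Int) y =>
          if y ∈ dead ∨ y ∈ p.1 then p else (PySem.Set.add p.1 y, y :: p.2)) (comp, rest)
        = (comp ++ news, news.reverse ++ rest) ∧
      news.Nodup ∧ (∀ y ∈ news, y ∈ nbrs ∧ y ∉ comp ∧ y ∉ dead) ∧
      (∀ y ∈ nbrs, y ∉ dead → y ∈ comp ++ news) := by
  induction nbrs with
  | nil => intro comp rest _; exact ⟨[], by simp⟩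
  | cons nb rest0 ih =>
    intro comp rest hnd
    by_cases h : nb ∈ dead ∨ nb ∈ comp
    · obtain ⟨news, heq, hnd', hmem, hall⟩ := ih comp rest hnd
      refine ⟨news, by simpa [h] using heq, hnd',
        fun y hy => ⟨List.mem_cons_of_mem _ (hmem y hy).1, (hmem y hy).2⟩, ?_⟩
      intro y hy hyd
      rcases List.mem_cons.mp hy with rfl | hy'
      · rcases h with h | h
        · exact absurd h hyd
        · exact List.mem_append.mpr (Or.inl h)
      · exact hall y hy' hyd
    · have h1 : nb ∉ dead := fun hc => h (Or.inl hc)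
      have h2 : nb ∉ comp := fun hc => h (Or.inr hc)
      have hadd : PySem.Set.add comp nb = comp ++ [nb] := PySem.Set.add_of_not_mem h2
      obtain ⟨news, heq, hnd', hmem, hall⟩ := ih (comp ++ [nb]) (nb :: rest)
        (by simp [List.nodup_append, hnd]; intro a ha rfl; exact h2 ha)
      refine ⟨nb :: news, ?_, ?_, ?_, ?_⟩
      · simp only [List.foldl_cons, if_neg h, hadd]
        rw [heq]; simp
      · exact List.nodup_cons.mpr ⟨fun hc => ((hmem nb hc).2.1 (by simp)), hnd'⟩
      · intro y hy
        rcases List.mem_cons.mp hy with rfl | hy'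
        · exact ⟨by simp, h2, h1⟩
        · obtain ⟨h1, h2, h3⟩ := hmem y hy'
          exact ⟨List.mem_cons_of_mem _ h1, fun hv => h2 (by simp [hv]), h3⟩
      · intro y hy hyd
        rcases List.mem_cons.mp hy with rfl | hy'
        · simp
        · have := hall y hy' hyd
          simp only [List.mem_append, List.mem_cons] at this ⊢
          tauto
-- all adjacency-list entries of a graph, as a Finset (bounds the number of possible enqueues)
def univF (g : PySem.Dict Int (PySem.Set Int)) : Finset Int :=
  (g.values.flatMap (fun l => l)).toFinset

theorem mem_univF_of {g : PySem.Dict Int (PySem.Set Int)} {u : Int} {nbrs : PySem.Set Int}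
    (h : g.get? u = some nbrs) {v : Int} (hv : v ∈ nbrs) : v ∈ univF g := by
  have h1 : (u, nbrs) ∈ g.items := PySem.Dict.mem_items_of_get?_eq_some g h
  have h2 : nbrs ∈ g.values := by
    simpa [PySem.Dict.values] using List.mem_map_of_mem (f := Prod.snd) h1
  simp only [univF, List.mem_toFinset, List.mem_flatMap]
  exact ⟨nbrs, h2, hv⟩

theorem mem_keys_of_get?_eq_some {g : PySem.Dict Int (PySem.Set Int)} {u : Int}
    {nbrs : PySem.Set Int} (h : g.get? u = some nbrs) : u ∈ g.keys := by
  by_contra hc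
  rw [(PySem.Dict.get?_eq_none_iff_not_mem_keys _ _).mpr hc] at h
  simp at h

theorem bfsLoop_spec (g : PySem.Dict Int (PySem.Set Int)) :
    ∀ (fuel : Nat) (q : List Int) (vis : PySem.Set Int),
    vis.Nodup → q.Nodup → (∀ u ∈ q, u ∈ vis) →
    (∀ u ∈ vis, u ∉ q → ∀ v, RelA g u v → v ∈ vis) →
    q.length + (univF g \ vis.toFinset).card ≤ fuel →
    (bfsLoop g fuel q vis).Nodup ∧
    ∀ x, (x ∈ bfsLoop g fuel q vis ↔ x ∈ vis ∨ ∃ u ∈ q, Relation.ReflTransGen (RelA g) u x) := by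
  intro fuel
  induction fuel with
  | zero =>
    intro q vis hnd _ _ _ hfuel
    have hq : q = [] := List.eq_nil_of_length_eq_zero (by omega)
    subst hq
    exact ⟨hnd, fun x => by simp [bfsLoop]⟩
  | succ f ih =>
    intro q vis hnd hqnd hsub hclosed hfuel
    match q with
    | [] => exact ⟨hnd, fun x => by simp [bfsLoop]⟩
    | deq :: qs =>
      have hdvis : deq ∈ vis := hsub deq (by simp)
      have hqnd' : qs.Nodup := (List.nodup_cons.mp hqnd).2
      have hdqs : deq ∉ qs := (List.nodup_cons.mp hqnd).1
      cases hget : g.get? deq with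
      | none =>
        have hdk : deq ∉ g.keys := (PySem.Dict.get?_eq_none_iff_not_mem_keys _ _).mp hget
        have step : bfsLoop g (f + 1) (deq :: qs) vis = bfsLoop g f qs vis := by
          simp [bfsLoop, hget]
        obtain ⟨hnd2, hiff⟩ := ih qs vis hnd hqnd' (fun u hu => hsub u (by simp [hu]))
          (fun u hu hnq v hrel => hclosed u hu
            (by simp only [List.mem_cons]; rintro (rfl | h); exact hdk hrel.1; exact hnq h) v hrel)
          (by simp at hfuel ⊢; omega)
        rw [step]
        refine ⟨hnd2, fun x => ?_⟩
        rw [hiff x]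
        constructor
        · rintro (h | ⟨u, hu, hr⟩)
          · exact Or.inl h
          · exact Or.inr ⟨u, by simp [hu], hr⟩
        · rintro (h | ⟨u, hu, hr⟩)
          · exact Or.inl h
          · rcases List.mem_cons.mp hu with rfl | hu'
            · rcases (Relation.ReflTransGen.cases_head hr) with rfl | ⟨c, hc, _⟩
              · exact Or.inl hdvis
              · exact absurd hc.1 hdk
            · exact Or.inr ⟨u, hu', hr⟩
      | some nbrs =>
        have hdk : deq ∈ g.keys := mem_keys_of_get?_eq_some hget
        have hgetD : g.getD deq [] = nbrs := PySem.Dict.getD_of_get?_eq_some g [] hget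
        obtain ⟨news, heq, hndn, hmemn, halln⟩ := foldA_spec nbrs vis qs hnd
        have step : bfsLoop g (f + 1) (deq :: qs) vis
            = bfsLoop g f (qs ++ news) (vis ++ news) := by
          simp only [bfsLoop, hget]
          rw [heq]
        -- disjointness facts
        have hnewvis : ∀ y ∈ news, y ∉ vis := fun y hy => (hmemn y hy).2
        have hnewnbrs : ∀ y ∈ news, y ∈ nbrs := fun y hy => (hmemn y hy).1
        have hnd2 : (vis ++ news).Nodup :=
          hnd.append hndn (List.disjoint_left.mpr (fun a ha hb => hnewvis a hb ha))
        have hqnd2 : (qs ++ news).Nodup :=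
          hqnd'.append hndn
            (List.disjoint_left.mpr (fun a ha hb => hnewvis a hb (hsub a (by simp [ha]))))
        have hsub2 : ∀ u ∈ qs ++ news, u ∈ vis ++ news := by
          intro u hu
          rcases List.mem_append.mp hu with h | h
          · exact List.mem_append.mpr (Or.inl (hsub u (by simp [h])))
          · exact List.mem_append.mpr (Or.inr h)
        have hclosed2 : ∀ u ∈ vis ++ news, u ∉ qs ++ news →
            ∀ v, RelA g u v → v ∈ vis ++ news := by
          intro u hu hnq v hrel
          rcases List.mem_append.mp hu with h | h
          · by_cases hud : u = deq
            · subst hud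
              have : v ∈ nbrs := by rw [← hgetD]; exact hrel.2
              exact halln v this
            · have : u ∉ deq :: qs := by
                simp only [List.mem_cons, not_or]
                exact ⟨hud, fun hq => hnq (List.mem_append.mpr (Or.inl hq))⟩
              exact List.mem_append.mpr (Or.inl (hclosed u h this v hrel))
          · exact absurd (List.mem_append.mpr (Or.inr h)) hnq
        have hfuel2 : (qs ++ news).length + (univF g \ (vis ++ news).toFinset).card ≤ f := by
          have htsub : news.toFinset ⊆ univF g \ vis.toFinset := by
            intro y hy
            rw [List.mem_toFinset] at hy
            exact Finset.mem_sdiff.mpr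
              ⟨mem_univF_of hget (hnewnbrs y hy), by
                rw [List.mem_toFinset]; exact hnewvis y hy⟩
          have hcard : news.toFinset.card = news.length := by
            rw [List.toFinset_card_of_nodup hndn]
          have hsd : univF g \ (vis ++ news).toFinset
              = (univF g \ vis.toFinset) \ news.toFinset := by
            rw [List.toFinset_append]
            ext a; simp [Finset.mem_sdiff]; tauto
          rw [hsd, Finset.card_sdiff, Finset.inter_eq_left.mpr htsub]
          have h1 := Finset.card_le_card htsub
          simp only [List.length_append] at *
          simp only [List.length_cons] at hfuel
          omega
        obtain ⟨hnd3, hiff⟩ := ih (qs ++ news) (vis ++ news) hnd2 hqnd2 hsub2 hclosed2 hfuel2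
        rw [step]
        refine ⟨hnd3, fun x => ?_⟩
        rw [hiff x]
        constructor
        · rintro (h | ⟨u, hu, hr⟩)
          · rcases List.mem_append.mp h with h | h
            · exact Or.inl h
            · -- x ∈ news : one step from deq
              refine Or.inr ⟨deq, by simp, Relation.ReflTransGen.single ?_⟩
              exact ⟨hdk, by rw [hgetD]; exact hnewnbrs x h⟩
          · rcases List.mem_append.mp hu with h | h
            · exact Or.inr ⟨u, by simp [h], hr⟩
            · refine Or.inr ⟨deq, by simp, Relation.ReflTransGen.trans
                (Relation.ReflTransGen.single ⟨hdk, by rw [hgetD]; exact hnewnbrs u h⟩) hr⟩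
        · rintro (h | ⟨u, hu, hr⟩)
          · exact Or.inl (List.mem_append.mpr (Or.inl h))
          · rcases List.mem_cons.mp hu with rfl | hu'
            · -- the hard direction: everything reachable from deq lands in the recursive call
              clear hiff hnd3 step hfuel2 hfuel
              induction hr with
              | refl => exact Or.inl (List.mem_append.mpr (Or.inl hdvis))
              | tail hab hbc ihr =>
                rename_i b c
                rcases ihr with hbv | ⟨w, hw, hrw⟩
                · rcases List.mem_append.mp hbv with hb | hb
                  · by_cases hbd : b = u
                    · subst hbd
                      have : c ∈ nbrs := by rw [← hgetD]; exact hbc.2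
                      exact Or.inl (halln c this)
                    · by_cases hbq : b ∈ qs
                      · exact Or.inr ⟨b, List.mem_append.mpr (Or.inl hbq),
                          Relation.ReflTransGen.single hbc⟩
                      · have : b ∉ u :: qs := by simp [hbd, hbq]
                        exact Or.inl (List.mem_append.mpr (Or.inl (hclosed b hb this c hbc)))
                  · exact Or.inr ⟨b, List.mem_append.mpr (Or.inr hb),
                      Relation.ReflTransGen.single hbc⟩
                · exact Or.inr ⟨w, hw, Relation.ReflTransGen.tail hrw hbc⟩
            · exact Or.inr ⟨u, List.mem_append.mpr (Or.inl hu'), hr⟩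
def univB (adj : PySem.Dict Int (List Int)) : Finset Int :=
  (adj.values.flatMap (fun l => l)).toFinset

theorem mem_univB_of {adj : PySem.Dict Int (List Int)} {u : Int} {nbrs : List Int}
    (h : adj.get? u = some nbrs) {v : Int} (hv : v ∈ nbrs) : v ∈ univB adj := by
  have h1 : (u, nbrs) ∈ adj.items := PySem.Dict.mem_items_of_get?_eq_some adj h
  have h2 : nbrs ∈ adj.values := by
    simpa [PySem.Dict.values] using List.mem_map_of_mem (f := Prod.snd) h1
  simp only [univB, List.mem_toFinset, List.mem_flatMap]
  exact ⟨nbrs, h2, hv⟩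

theorem mem_keysB_of_get?_eq_some {adj : PySem.Dict Int (List Int)} {u : Int}
    {nbrs : List Int} (h : adj.get? u = some nbrs) : u ∈ adj.keys := by
  by_contra hc
  rw [(PySem.Dict.get?_eq_none_iff_not_mem_keys _ _).mpr hc] at h
  simp at h

theorem dfsLoop_spec (adj : PySem.Dict Int (List Int)) (dead : PySem.Set Int) :
    ∀ (fuel : Nat) (stk : List Int) (comp : PySem.Set Int),
    comp.Nodup → stk.Nodup → (∀ u ∈ stk, u ∈ comp) →
    (∀ u ∈ comp, u ∉ stk → ∀ v, RelB adj dead u v → v ∈ comp) →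
    stk.length + (univB adj \ comp.toFinset).card ≤ fuel →
    (dfsLoop adj dead fuel stk comp).Nodup ∧
    ∀ x, (x ∈ dfsLoop adj dead fuel stk comp ↔
      x ∈ comp ∨ ∃ u ∈ stk, Relation.ReflTransGen (RelB adj dead) u x) := by
  intro fuel
  induction fuel with
  | zero =>
    intro stk comp hnd _ _ _ hfuel
    have hq : stk = [] := List.eq_nil_of_length_eq_zero (by omega)
    subst hq
    exact ⟨hnd, fun x => by simp [dfsLoop]⟩
  | succ f ih =>
    intro stk comp hnd hqnd hsub hclosed hfuel
    match stk with
    | [] => exact ⟨hnd, fun x => by simp [dfsLoop]⟩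
    | deq :: qs =>
      have hdvis : deq ∈ comp := hsub deq (by simp)
      have hqnd' : qs.Nodup := (List.nodup_cons.mp hqnd).2
      have hdqs : deq ∉ qs := (List.nodup_cons.mp hqnd).1
      cases hget : adj.get? deq with
      | none =>
        have hdk : deq ∉ adj.keys := (PySem.Dict.get?_eq_none_iff_not_mem_keys _ _).mp hget
        have step : dfsLoop adj dead (f + 1) (deq :: qs) comp = dfsLoop adj dead f qs comp := by
          simp [dfsLoop, hget]
        obtain ⟨hnd2, hiff⟩ := ih qs comp hnd hqnd' (fun u hu => hsub u (by simp [hu]))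
          (fun u hu hnq v hrel => hclosed u hu
            (by simp only [List.mem_cons]; rintro (rfl | h); exact hdk hrel.1; exact hnq h) v hrel)
          (by simp at hfuel ⊢; omega)
        rw [step]
        refine ⟨hnd2, fun x => ?_⟩
        rw [hiff x]
        constructor
        · rintro (h | ⟨u, hu, hr⟩)
          · exact Or.inl h
          · exact Or.inr ⟨u, by simp [hu], hr⟩
        · rintro (h | ⟨u, hu, hr⟩)
          · exact Or.inl h
          · rcases List.mem_cons.mp hu with rfl | hu'
            · rcases (Relation.ReflTransGen.cases_head hr) with rfl | ⟨c, hc, _⟩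
              · exact Or.inl hdvis
              · exact absurd hc.1 hdk
            · exact Or.inr ⟨u, hu', hr⟩
      | some nbrs =>
        have hdk : deq ∈ adj.keys := mem_keysB_of_get?_eq_some hget
        have hgetD : adj.getD deq [] = nbrs := PySem.Dict.getD_of_get?_eq_some adj [] hget
        obtain ⟨news, heq, hndn, hmemn, halln⟩ := foldB_spec dead nbrs comp qs hnd
        have step : dfsLoop adj dead (f + 1) (deq :: qs) comp
            = dfsLoop adj dead f (news.reverse ++ qs) (comp ++ news) := by
          simp only [dfsLoop, hget]
          rw [heq]
        have hnewvis : ∀ y ∈ news, y ∉ comp := fun y hy => (hmemn y hy).2.1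
        have hnewnbrs : ∀ y ∈ news, y ∈ nbrs := fun y hy => (hmemn y hy).1
        have hnewdead : ∀ y ∈ news, y ∉ dead := fun y hy => (hmemn y hy).2.2
        have hnd2 : (comp ++ news).Nodup :=
          hnd.append hndn (List.disjoint_left.mpr (fun a ha hb => hnewvis a hb ha))
        have hqnd2 : (news.reverse ++ qs).Nodup :=
          (List.nodup_reverse.mpr hndn).append hqnd'
            (List.disjoint_left.mpr (fun a ha hb =>
              hnewvis a (List.mem_reverse.mp ha) (hsub a (by simp [hb]))))
        have hsub2 : ∀ u ∈ news.reverse ++ qs, u ∈ comp ++ news := by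
          intro u hu
          rcases List.mem_append.mp hu with h | h
          · exact List.mem_append.mpr (Or.inr (List.mem_reverse.mp h))
          · exact List.mem_append.mpr (Or.inl (hsub u (by simp [h])))
        have hclosed2 : ∀ u ∈ comp ++ news, u ∉ news.reverse ++ qs →
            ∀ v, RelB adj dead u v → v ∈ comp ++ news := by
          intro u hu hnq v hrel
          rcases List.mem_append.mp hu with h | h
          · by_cases hud : u = deq
            · subst hud
              have hv : v ∈ nbrs := by rw [← hgetD]; exact hrel.2.1
              exact halln v hv hrel.2.2
            · have : u ∉ deq :: qs := by
                simp only [List.mem_cons, not_or]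
                exact ⟨hud, fun hq => hnq (List.mem_append.mpr (Or.inr hq))⟩
              exact List.mem_append.mpr (Or.inl (hclosed u h this v hrel))
          · exact absurd (List.mem_append.mpr (Or.inl (List.mem_reverse.mpr h))) hnq
        have hfuel2 : (news.reverse ++ qs).length
            + (univB adj \ (comp ++ news).toFinset).card ≤ f := by
          have htsub : news.toFinset ⊆ univB adj \ comp.toFinset := by
            intro y hy
            rw [List.mem_toFinset] at hy
            exact Finset.mem_sdiff.mpr
              ⟨mem_univB_of hget (hnewnbrs y hy), by
                rw [List.mem_toFinset]; exact hnewvis y hy⟩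
          have hcard : news.toFinset.card = news.length := by
            rw [List.toFinset_card_of_nodup hndn]
          have hsd : univB adj \ (comp ++ news).toFinset
              = (univB adj \ comp.toFinset) \ news.toFinset := by
            rw [List.toFinset_append]
            ext a; simp [Finset.mem_sdiff]; tauto
          rw [hsd, Finset.card_sdiff, Finset.inter_eq_left.mpr htsub]
          have h1 := Finset.card_le_card htsub
          simp only [List.length_append, List.length_reverse] at *
          simp only [List.length_cons] at hfuel
          omega
        obtain ⟨hnd3, hiff⟩ := ih (news.reverse ++ qs) (comp ++ news) hnd2 hqnd2 hsub2 hclosed2 hfuel2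
        rw [step]
        refine ⟨hnd3, fun x => ?_⟩
        rw [hiff x]
        constructor
        · rintro (h | ⟨u, hu, hr⟩)
          · rcases List.mem_append.mp h with h | h
            · exact Or.inl h
            · refine Or.inr ⟨deq, by simp, Relation.ReflTransGen.single ?_⟩
              exact ⟨hdk, by rw [hgetD]; exact hnewnbrs x h, hnewdead x h⟩
          · rcases List.mem_append.mp hu with h | h
            · have hrel : RelB adj dead deq u :=
                ⟨hdk, by rw [hgetD]; exact hnewnbrs u (List.mem_reverse.mp h),
                  hnewdead u (List.mem_reverse.mp h)⟩
              exact Or.inr ⟨deq, by simp, Relation.ReflTransGen.trans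
                (Relation.ReflTransGen.single hrel) hr⟩
            · exact Or.inr ⟨u, by simp [h], hr⟩
        · rintro (h | ⟨u, hu, hr⟩)
          · exact Or.inl (List.mem_append.mpr (Or.inl h))
          · rcases List.mem_cons.mp hu with rfl | hu'
            · clear hiff hnd3 step hfuel2 hfuel
              induction hr with
              | refl => exact Or.inl (List.mem_append.mpr (Or.inl hdvis))
              | tail hab hbc ihr =>
                rename_i b c
                rcases ihr with hbv | ⟨w, hw, hrw⟩
                · rcases List.mem_append.mp hbv with hb | hb
                  · by_cases hbd : b = u
                    · subst hbd
                      have hc : c ∈ nbrs := by rw [← hgetD]; exact hbc.2.1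
                      exact Or.inl (halln c hc hbc.2.2)
                    · by_cases hbq : b ∈ qs
                      · exact Or.inr ⟨b, List.mem_append.mpr (Or.inr hbq),
                          Relation.ReflTransGen.single hbc⟩
                      · have : b ∉ u :: qs := by simp [hbd, hbq]
                        exact Or.inl (List.mem_append.mpr (Or.inl (hclosed b hb this c hbc)))
                  · exact Or.inr ⟨b, List.mem_append.mpr (Or.inl (List.mem_reverse.mpr hb)),
                      Relation.ReflTransGen.single hbc⟩
                · exact Or.inr ⟨w, hw, Relation.ReflTransGen.tail hrw hbc⟩
            · exact Or.inr ⟨u, List.mem_append.mpr (Or.inr hu'), hr⟩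
-- two Nodup lists with the same members have the same length
theorem nodup_len_eq {l1 l2 : List Int} (h1 : l1.Nodup) (h2 : l2.Nodup)
    (h : ∀ x, x ∈ l1 ↔ x ∈ l2) : l1.length = l2.length :=
  ((List.perm_ext_iff_of_nodup h1 h2).mpr h).length_eq

theorem nodup_subset_len_le {l1 l2 : List Int} (h1 : l1.Nodup)
    (hs : ∀ x ∈ l1, x ∈ l2) : l1.length ≤ l2.length := by
  calc l1.length = l1.toFinset.card := (List.toFinset_card_of_nodup h1).symm
    _ ≤ l2.toFinset.card := Finset.card_le_card (fun a ha => by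
        rw [List.mem_toFinset] at *; exact hs a ha)
    _ ≤ l2.length := List.toFinset_card_le l2

-- the running-maximum fold both programs use
def fmax (i : Int) (l : List Int) : Int := l.foldl (fun m x => if x > m then x else m) i

theorem le_fmax_init (i : Int) (l : List Int) : i ≤ fmax i l := by
  induction l generalizing i with
  | nil => simp [fmax]
  | cons x xs ih =>
    simp only [fmax, List.foldl_cons]
    refine le_trans ?_ (ih (if x > i then x else i))
    split <;> omega

theorem le_fmax_mem {x : Int} {l : List Int} (i : Int) (h : x ∈ l) : x ≤ fmax i l := by
  induction l generalizing i with
  | nil => simp at h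
  | cons y ys ih =>
    simp only [fmax, List.foldl_cons]
    rcases List.mem_cons.mp h with rfl | h'
    · refine le_trans ?_ (le_fmax_init _ _)
      split <;> omega
    · exact ih _ h'

theorem fmax_cases (i : Int) (l : List Int) : fmax i l = i ∨ fmax i l ∈ l := by
  induction l generalizing i with
  | nil => simp [fmax]
  | cons x xs ih =>
    have hx : fmax i (x :: xs) = fmax (if x > i then x else i) xs := rfl
    rw [hx]
    rcases ih (if x > i then x else i) with h | h
    · rw [h]; split
      · right; simp
      · left; rfl
    · right; exact List.mem_cons_of_mem _ h

theorem fmax_cons_le {x i : Int} {l : List Int} (h : x ≤ i) : fmax i (x :: l) = fmax i l := by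
  simp only [fmax, List.foldl_cons]
  rw [if_neg (by omega)]

-- the remain.remove step of A is List.erase
theorem removeClusterA_step (r : List Int) (x : Int) :
    (if x ∈ r then (PySem.List.remove? r x).getD r else r) = r.erase x := by
  by_cases h : x ∈ r
  · rw [if_pos h]
    unfold PySem.List.remove?
    rw [List.erase_eq_eraseIdx]
    cases hidx : List.idxOf? x r <;> simp
  · rw [if_neg h, List.erase_of_not_mem h]

theorem removeClusterA_mem {remain : List Int} (hnd : remain.Nodup) (cluster : List Int) :
    (removeClusterA remain cluster).Nodup ∧
    ∀ x, (x ∈ removeClusterA remain cluster ↔ x ∈ remain ∧ x ∉ cluster) := by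
  have hfun : (fun (r : List Int) (x : Int) =>
      if x ∈ r then (PySem.List.remove? r x).getD r else r) = (fun r x => r.erase x) := by
    funext r x; exact removeClusterA_step r x
  unfold removeClusterA
  rw [hfun]
  induction cluster generalizing remain with
  | nil => exact ⟨hnd, fun x => by simp⟩
  | cons c cs ih =>
    simp only [List.foldl_cons]
    obtain ⟨hnd', hiff⟩ := ih (hnd.erase c)
    refine ⟨hnd', fun x => ?_⟩
    rw [hiff x, List.Nodup.mem_erase_iff hnd]
    simp only [List.mem_cons]
    tauto

-- Dict.erase lookups
theorem get?_erase {ν : Type} (d : PySem.Dict Int ν) (node u : Int) :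
    (d.erase node).get? u = if u = node then none else d.get? u := by
  obtain ⟨items⟩ := d
  induction items with
  | nil =>
    show (PySem.Dict.mk [] : PySem.Dict Int ν).get? u = _
    simp [PySem.Dict.get?]
  | cons p rest ih =>
    obtain ⟨k, v⟩ := p
    show (PySem.Dict.mk (((k, v) :: rest).filter (fun q => !q.1 == node))).get? u = _
    rw [List.filter_cons]
    have hrw : ((PySem.Dict.mk rest : PySem.Dict Int ν).erase node)
        = PySem.Dict.mk (rest.filter (fun q => !q.1 == node)) := rfl
    rw [hrw] at ih
    by_cases hp : k = node
    · rw [if_neg (by simp [hp])]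
      rw [ih]
      by_cases hu : u = node
      · simp [hu]
      · rw [if_neg hu, if_neg hu, PySem.Dict.get?_mk_cons,
          if_neg (by simp; omega)]
    · rw [if_pos (by simp [hp])]
      rw [PySem.Dict.get?_mk_cons, PySem.Dict.get?_mk_cons]
      by_cases hk : k = u
      · have hun : u ≠ node := fun h => hp (hk.trans h)
        simp [hk, hun]
      · rw [if_neg (by simpa using hk), ih]
        by_cases hu : u = node
        · simp [hu]
        · simp [hu, hk]
-- characterization of copy_graph: same keys, values dedup'd but with the same members
theorem copyGraph_items (g : PySem.Dict Int (PySem.Set Int)) (hk : g.keys.Nodup) :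
    (copyGraph g).items = g.keys.map (fun k => (k, PySem.Set.ofList (g.getD k []))) := by
  unfold copyGraph
  have h := PySem.Dict.items_foldl_insert_fresh (l := g.keys) (k := fun k => k)
    (v := fun k => PySem.Set.ofList (g.getD k [])) (d := PySem.Dict.empty)
    (fun a _ => PySem.Dict.contains_empty a) (by simpa using hk)
  refine h.trans ?_
  rw [show (PySem.Dict.empty : PySem.Dict Int (PySem.Set Int)).items = [] from rfl]
  rfl

theorem copyGraph_keys (g : PySem.Dict Int (PySem.Set Int)) (hk : g.keys.Nodup) :
    (copyGraph g).keys = g.keys := by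
  show ((copyGraph g).items).map Prod.fst = g.keys
  rw [copyGraph_items g hk, List.map_map]
  exact List.map_id g.keys

theorem copyGraph_getD_mem (g : PySem.Dict Int (PySem.Set Int)) (hk : g.keys.Nodup)
    (u v : Int) : v ∈ (copyGraph g).getD u [] ↔ v ∈ g.getD u [] := by
  by_cases h : u ∈ g.keys
  · have hm : (u, PySem.Set.ofList (g.getD u [])) ∈ (copyGraph g).items := by
      rw [copyGraph_items g hk]
      exact List.mem_map_of_mem h
    rw [PySem.Dict.getD_of_mem_items _ hm (by rw [copyGraph_keys g hk]; exact hk) []]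
    exact PySem.Set.mem_ofList _ v
  · have h1 : (copyGraph g).getD u [] = [] := by
      refine PySem.Dict.getD_of_not_contains _ [] ?_
      have : u ∉ (copyGraph g).keys := by rw [copyGraph_keys g hk]; exact h
      simpa using fun hc => this ((PySem.Dict.contains_iff_mem_keys _ _).mp hc)
    have h2 : g.getD u [] = [] := by
      refine PySem.Dict.getD_of_not_contains _ [] ?_
      simpa using fun hc => h ((PySem.Dict.contains_iff_mem_keys _ _).mp hc)
    rw [h1, h2]

theorem RelA_copy (g : PySem.Dict Int (PySem.Set Int)) (hk : g.keys.Nodup) (u v : Int) :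
    RelA (copyGraph g) u v ↔ RelA g u v := by
  unfold RelA
  rw [copyGraph_keys g hk, copyGraph_getD_mem g hk]

theorem rtc_iff_of_rel_iff {R R' : Int → Int → Prop} (h : ∀ u v, R u v ↔ R' u v) (a b : Int) :
    Relation.ReflTransGen R a b ↔ Relation.ReflTransGen R' a b :=
  ⟨Relation.ReflTransGen.mono (fun u v hr => (h u v).mp hr),
   Relation.ReflTransGen.mono (fun u v hr => (h u v).mpr hr)⟩

-- bfs_visited computes exactly the RelA-reachable set
theorem bfs_visited_spec (g : PySem.Dict Int (PySem.Set Int)) (hk : g.keys.Nodup) (s : Int) :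
    (bfs_visited g s).Nodup ∧ ∀ x, (x ∈ bfs_visited g s ↔ Relation.ReflTransGen (RelA g) s x) := by
  unfold bfs_visited
  have hadd : PySem.Set.add PySem.Set.empty s = [s] := rfl
  rw [hadd]
  have hfuel : [s].length + (univF (copyGraph g) \ ([s] : List Int).toFinset).card
      ≤ bfsFuel (copyGraph g) := by
    unfold bfsFuel univF
    have h1 : ((copyGraph g).values.flatMap (fun l => l)).toFinset.card
        ≤ ((copyGraph g).values.map List.length).sum := by
      refine le_trans (List.toFinset_card_le _) ?_
      simp
    have h2 := Finset.card_le_card (Finset.sdiff_subset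
      (s := ((copyGraph g).values.flatMap (fun l => l)).toFinset)
      (t := ([s] : List Int).toFinset))
    simp only [List.length_cons, List.length_nil]
    omega
  obtain ⟨hnd, hiff⟩ := bfsLoop_spec (copyGraph g) (bfsFuel (copyGraph g)) [s] [s]
    (by simp) (by simp) (by simp) (by simp) hfuel
  refine ⟨hnd, fun x => ?_⟩
  rw [hiff x]
  constructor
  · rintro (h | ⟨u, hu, hr⟩)
    · have hxs : x = s := by simpa using h
      rw [hxs]
    · have hus : u = s := by simpa using hu
      subst hus
      exact (rtc_iff_of_rel_iff (RelA_copy g hk) u x).mp hr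
  · intro h
    exact Or.inr ⟨s, by simp, (rtc_iff_of_rel_iff (RelA_copy g hk) s x).mpr h⟩

-- the component DFS of B computes exactly the RelB-reachable set
theorem dfsComp_spec (adj : PySem.Dict Int (List Int)) (dead : PySem.Set Int) (u : Int) :
    (dfsLoop adj dead (dfsFuel adj) [u] (PySem.Set.add PySem.Set.empty u)).Nodup ∧
    ∀ x, (x ∈ dfsLoop adj dead (dfsFuel adj) [u] (PySem.Set.add PySem.Set.empty u) ↔
      Relation.ReflTransGen (RelB adj dead) u x) := by
  have hadd : PySem.Set.add PySem.Set.empty u = [u] := rfl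
  rw [hadd]
  have hfuel : [u].length + (univB adj \ ([u] : List Int).toFinset).card ≤ dfsFuel adj := by
    unfold dfsFuel univB
    have h1 : (adj.values.flatMap (fun l => l)).toFinset.card
        ≤ (adj.values.map List.length).sum := by
      refine le_trans (List.toFinset_card_le _) ?_
      simp
    have h2 := Finset.card_le_card (Finset.sdiff_subset
      (s := (adj.values.flatMap (fun l => l)).toFinset)
      (t := ([u] : List Int).toFinset))
    simp only [List.length_cons, List.length_nil]
    omega
  obtain ⟨hnd, hiff⟩ := dfsLoop_spec adj dead (dfsFuel adj) [u] [u]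
    (by simp) (by simp) (by simp) (by simp) hfuel
  refine ⟨hnd, fun x => ?_⟩
  rw [hiff x]
  constructor
  · rintro (h | ⟨w, hw, hr⟩)
    · have hxu : x = u := by simpa using h
      rw [hxu]
    · have hwu : w = u := by simpa using hw
      subst hwu
      exact hr
  · intro h; exact Or.inr ⟨u, by simp, h⟩
theorem ccLoop_spec (g : PySem.Dict Int (PySem.Set Int)) (hk : g.keys.Nodup) :
    ∀ (n : Nat) (remain : List Int) (acc : List (PySem.Set Int)),
    remain.length ≤ n → remain.Nodup →
    ∃ cl, ccLoop g remain acc = acc ++ cl ∧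
      (∀ c ∈ cl, ∃ s ∈ remain, c = bfs_visited g s) ∧
      (∀ u ∈ remain, ∃ c ∈ cl, u ∈ c) := by
  intro n
  induction n with
  | zero =>
    intro remain acc hlen _
    have : remain = [] := List.eq_nil_of_length_eq_zero (by omega)
    subst this
    exact ⟨[], by rw [ccLoop]; simp, by simp, by simp⟩
  | succ n ih =>
    intro remain acc hlen hnd
    by_cases h : remain = []
    · subst h
      exact ⟨[], by rw [ccLoop]; simp, by simp, by simp⟩
    · have hstep : ccLoop g remain acc
          = ccLoop g (removeClusterA remain.dropLast (bfs_visited g (remain.getLast h)))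
              (acc ++ [bfs_visited g (remain.getLast h)]) := by
        rw [ccLoop]; rw [dif_neg h]
      set seed := remain.getLast h with hseed
      set cluster := bfs_visited g seed with hcluster
      have hndDrop : remain.dropLast.Nodup := hnd.sublist (List.dropLast_sublist remain)
      obtain ⟨hndR, hmemR⟩ := removeClusterA_mem hndDrop cluster
      have hlen' : (removeClusterA remain.dropLast cluster).length ≤ n := by
        have h1 := removeClusterA_length_le remain.dropLast cluster
        have h2 : remain.length ≠ 0 := fun hl => h (List.eq_nil_of_length_eq_zero hl)
        have h3 : remain.dropLast.length = remain.length - 1 := List.length_dropLast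
        omega
      obtain ⟨cl', heq', hsrc', hcov'⟩ := ih (removeClusterA remain.dropLast cluster)
        (acc ++ [cluster]) hlen' hndR
      have hdecomp : remain.dropLast ++ [seed] = remain := List.dropLast_append_getLast h
      refine ⟨cluster :: cl', ?_, ?_, ?_⟩
      · rw [hstep, heq']
        simp
      · intro c hc
        rcases List.mem_cons.mp hc with rfl | hc'
        · exact ⟨seed, List.getLast_mem h, rfl⟩
        · obtain ⟨s, hs, hcs⟩ := hsrc' c hc'
          have : s ∈ remain.dropLast := ((hmemR s).mp hs).1
          exact ⟨s, by rw [← hdecomp]; exact List.mem_append.mpr (Or.inl this), hcs⟩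
      · intro u hu
        by_cases hc : u ∈ cluster
        · exact ⟨cluster, by simp, hc⟩
        · have huDrop : u ∈ remain.dropLast := by
            rw [← hdecomp] at hu
            rcases List.mem_append.mp hu with h1 | h1
            · exact h1
            · exfalso
              have : u = seed := by simpa using h1
              subst this
              exact hc (((bfs_visited_spec g hk seed).2 seed).mpr Relation.ReflTransGen.refl)
          have : u ∈ removeClusterA remain.dropLast cluster := (hmemR u).mpr ⟨huDrop, hc⟩
          obtain ⟨c, hcmem, hcu⟩ := hcov' u this
          exact ⟨c, List.mem_cons_of_mem _ hcmem, hcu⟩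

-- size transfer through copy_graph
theorem bfs_mem_copy (g : PySem.Dict Int (PySem.Set Int)) (hk : g.keys.Nodup) (u x : Int) :
    x ∈ bfs_visited (copyGraph g) u ↔ x ∈ bfs_visited g u := by
  rw [(bfs_visited_spec (copyGraph g) (by rw [copyGraph_keys g hk]; exact hk) u).2 x,
    (bfs_visited_spec g hk u).2 x]
  exact rtc_iff_of_rel_iff (RelA_copy g hk) u x

theorem bfs_len_copy (g : PySem.Dict Int (PySem.Set Int)) (hk : g.keys.Nodup) (u : Int) :
    (bfs_visited (copyGraph g) u).length = (bfs_visited g u).length :=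
  nodup_len_eq (bfs_visited_spec (copyGraph g) (by rw [copyGraph_keys g hk]; exact hk) u).1
    (bfs_visited_spec g hk u).1 (bfs_mem_copy g hk u)

theorem largest_eq (g : PySem.Dict Int (PySem.Set Int)) (hk : g.keys.Nodup) :
    largest_cc_size g
      = fmax 0 (g.keys.map (fun u => PySem.Set.len (bfs_visited g u))) := by
  have hk1 : (copyGraph g).keys = g.keys := copyGraph_keys g hk
  have hknd1 : (copyGraph g).keys.Nodup := by rw [hk1]; exact hk
  have hk2 : (copyGraph (copyGraph g)).keys = g.keys := by
    rw [copyGraph_keys _ hknd1, hk1]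
  have hknd2 : (copyGraph (copyGraph g)).keys.Nodup := by rw [hk2]; exact hk
  -- membership/length of clusters over the doubly-copied graph, in terms of g
  have hmem2 : ∀ u x, x ∈ bfs_visited (copyGraph (copyGraph g)) u ↔ x ∈ bfs_visited g u := by
    intro u x
    rw [bfs_mem_copy (copyGraph g) hknd1 u x, bfs_mem_copy g hk u x]
  have hlen2 : ∀ u, (bfs_visited (copyGraph (copyGraph g)) u).length
      = (bfs_visited g u).length := by
    intro u
    rw [bfs_len_copy (copyGraph g) hknd1 u, bfs_len_copy g hk u]
  obtain ⟨cl, hccl, hsrc, hcov⟩ := ccLoop_spec (copyGraph (copyGraph g)) hknd2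
    (copyGraph (copyGraph g)).keys.length (copyGraph (copyGraph g)).keys [] le_rfl hknd2
  simp only [largest_cc_size, cc_visited]
  rw [hccl]
  simp only [List.nil_append]
  -- the fold over clusters is fmax 1 over their lengths
  have hfold : cl.foldl (fun m c => if PySem.Set.len c > m then PySem.Set.len c else m) 1
      = fmax 1 (cl.map PySem.Set.len) := by
    rw [fmax, List.foldl_map]
  by_cases hkeys : g.keys = []
  · have hitems : (copyGraph g).items = [] := by
      have := hk1
      rw [hkeys] at this
      exact List.map_eq_nil_iff.mp this
    rw [if_pos hitems, hkeys]
    simp [fmax]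
  · have hitems : (copyGraph g).items ≠ [] := by
      intro hc
      apply hkeys
      rw [← hk1]
      show ((copyGraph g).items).map Prod.fst = []
      rw [hc]
      rfl
    rw [if_neg hitems, hfold]
    -- abbreviations
    set σ : Int → Int := fun u => PySem.Set.len (bfs_visited g u) with hσ
    have hσ1 : ∀ u, 1 ≤ σ u := by
      intro u
      have hu : u ∈ bfs_visited g u :=
        ((bfs_visited_spec g hk u).2 u).mpr Relation.ReflTransGen.refl
      have : 0 < (bfs_visited g u).length := List.length_pos_of_mem hu
      simp only [hσ, PySem.Set.len]
      omega
    -- each cluster's length is σ of its seed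
    have hclen : ∀ c ∈ cl, ∃ s ∈ g.keys, PySem.Set.len c = σ s := by
      intro c hc
      obtain ⟨s, hs, rfl⟩ := hsrc c hc
      refine ⟨s, by rw [← hk2]; exact hs, ?_⟩
      simp only [hσ, PySem.Set.len]
      rw [hlen2 s]
    -- every key's σ is dominated by the length of a cluster containing it
    have hdom : ∀ u ∈ g.keys, ∃ c ∈ cl, σ u ≤ PySem.Set.len c := by
      intro u hu
      obtain ⟨c, hcmem, hcu⟩ := hcov u (by rw [hk2]; exact hu)
      refine ⟨c, hcmem, ?_⟩
      obtain ⟨s, _, rfl⟩ := hsrc c hcmem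
      -- u is reachable from s, so reach(u) ⊆ reach(s)
      have hru : Relation.ReflTransGen (RelA g) s u := by
        have := ((bfs_visited_spec (copyGraph (copyGraph g)) hknd2 s).2 u).mp hcu
        rw [rtc_iff_of_rel_iff (RelA_copy (copyGraph g) hknd1) s u,
          rtc_iff_of_rel_iff (RelA_copy g hk) s u] at this
        exact this
      have hsubset : ∀ x ∈ bfs_visited g u, x ∈ bfs_visited (copyGraph (copyGraph g)) s := by
        intro x hx
        have hrx := ((bfs_visited_spec g hk u).2 x).mp hx
        have : Relation.ReflTransGen (RelA g) s x := hru.trans hrx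
        rw [← rtc_iff_of_rel_iff (RelA_copy g hk) s x,
          ← rtc_iff_of_rel_iff (RelA_copy (copyGraph g) hknd1) s x] at this
        exact ((bfs_visited_spec (copyGraph (copyGraph g)) hknd2 s).2 x).mpr this
      have hle := nodup_subset_len_le (bfs_visited_spec g hk u).1 hsubset
      simp only [hσ, PySem.Set.len]
      omega
    -- antisymmetry
    have hkeysne : ∃ u0, u0 ∈ g.keys := List.exists_mem_of_ne_nil g.keys hkeys
    obtain ⟨u0, hu0⟩ := hkeysne
    apply le_antisymm
    · rcases fmax_cases 1 (cl.map PySem.Set.len) with h | h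
      · rw [h]
        calc (1 : Int) ≤ σ u0 := hσ1 u0
          _ ≤ fmax 0 (g.keys.map σ) := le_fmax_mem 0 (List.mem_map_of_mem hu0)
      · obtain ⟨c, hc, hlenc⟩ := List.mem_map.mp h
        obtain ⟨s, hskey, hcs⟩ := hclen c hc
        rw [← hlenc, hcs]
        exact le_fmax_mem 0 (List.mem_map_of_mem hskey)
    · rcases fmax_cases 0 (g.keys.map σ) with h | h
      · rw [h]
        exact le_trans (by omega) (le_fmax_init 1 (cl.map PySem.Set.len))
      · obtain ⟨u, hukey, hv⟩ := List.mem_map.mp h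
        obtain ⟨c, hcmem, hle⟩ := hdom u hukey
        rw [← hv]
        exact le_trans hle (le_fmax_mem 1 (List.mem_map_of_mem hcmem))
-- the component B computes from seed u (exactly the expression inlined in largestAlive)
def dfsComp (adj : PySem.Dict Int (List Int)) (dead : PySem.Set Int) (u : Int) : PySem.Set Int :=
  dfsLoop adj dead (dfsFuel adj) [u] (PySem.Set.add PySem.Set.empty u)

theorem dfsComp_mono (adj : PySem.Dict Int (List Int)) (dead : PySem.Set Int) {s u : Int}
    (h : u ∈ dfsComp adj dead s) :
    PySem.Set.len (dfsComp adj dead u) ≤ PySem.Set.len (dfsComp adj dead s) := by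
  have hru := ((dfsComp_spec adj dead s).2 u).mp h
  have hsub : ∀ x ∈ dfsComp adj dead u, x ∈ dfsComp adj dead s := by
    intro x hx
    exact ((dfsComp_spec adj dead s).2 x).mpr (hru.trans (((dfsComp_spec adj dead u).2 x).mp hx))
  have := nodup_subset_len_le (dfsComp_spec adj dead u).1 hsub
  simp only [PySem.Set.len, dfsComp] at this ⊢
  omega

theorem B_fold_inv (adj : PySem.Dict Int (List Int)) (dead : PySem.Set Int) :
    ∀ (L : List Int) (best : Int) (seen : PySem.Set Int),
    0 ≤ best →
    (∀ x ∈ seen, ∃ s, x ∈ dfsComp adj dead s ∧ PySem.Set.len (dfsComp adj dead s) ≤ best) →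
    (L.foldl
      (fun (p : Int × PySem.Set Int) u =>
        if u ∈ dead ∨ u ∈ p.2 then p
        else
          let comp := dfsLoop adj dead (dfsFuel adj) [u] (PySem.Set.add PySem.Set.empty u)
          (if PySem.Set.len comp > p.1 then PySem.Set.len comp else p.1,
           PySem.Set.update p.2 comp))
      (best, seen)).1
    = fmax best ((L.filter (fun u => decide (u ∉ dead))).map
        (fun u => PySem.Set.len (dfsComp adj dead u))) := by
  intro L
  induction L with
  | nil => intro best seen _ _; simp [fmax]
  | cons u L' ih =>
    intro best seen hbest hinv
    by_cases hdead : u ∈ dead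
    · rw [List.foldl_cons, if_pos (Or.inl hdead), List.filter_cons_of_neg (by simp [hdead])]
      exact ih best seen hbest hinv
    · rw [List.filter_cons_of_pos (by simp [hdead])]
      by_cases hseen : u ∈ seen
      · rw [List.foldl_cons, if_pos (Or.inr hseen)]
        obtain ⟨s, hus, hsb⟩ := hinv u hseen
        have hle : PySem.Set.len (dfsComp adj dead u) ≤ best :=
          le_trans (dfsComp_mono adj dead hus) hsb
        rw [List.map_cons, fmax_cons_le hle]
        exact ih best seen hbest hinv
      · rw [List.foldl_cons, if_neg (by simp [hdead, hseen])]
        simp only []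
        set c := dfsLoop adj dead (dfsFuel adj) [u] (PySem.Set.add PySem.Set.empty u) with hc
        have hcc : c = dfsComp adj dead u := rfl
        set best' := if PySem.Set.len c > best then PySem.Set.len c else best with hbest'
        have h0 : 0 ≤ best' := by rw [hbest']; split <;> omega
        have hbb : best ≤ best' := by rw [hbest']; split <;> omega
        have hinv' : ∀ x ∈ PySem.Set.update seen c,
            ∃ s, x ∈ dfsComp adj dead s ∧ PySem.Set.len (dfsComp adj dead s) ≤ best' := by
          intro x hx
          rcases (PySem.Set.mem_update seen c x).mp hx with hx | hx
          · obtain ⟨s, h1, h2⟩ := hinv x hx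
            exact ⟨s, h1, le_trans h2 hbb⟩
          · refine ⟨u, by rw [← hcc]; exact hx, ?_⟩
            rw [← hcc, hbest']; split <;> omega
        have := ih best' (PySem.Set.update seen c) h0 hinv'
        rw [this]
        rw [List.map_cons]
        rfl
-- keys of Dict.erase
theorem keys_erase {ν : Type} (d : PySem.Dict Int ν) (node : Int) :
    (d.erase node).keys = d.keys.filter (fun k => !(k == node)) := by
  show ((d.items.filter (fun p => !(p.1 == node))).map Prod.fst)
    = (d.items.map Prod.fst).filter (fun k => !(k == node))
  induction d.items with
  | nil => rfl
  | cons p rest ih =>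
    by_cases hp : p.1 = node
    · simp [hp, ih]
    · simp [hp, ih]

-- A's del step: lookups after `if node in graph: del graph[node]`
theorem attack_del_get? (g : PySem.Dict Int (PySem.Set Int)) (node : Int) :
    ∀ u, (if g.contains node then g.erase node else g).get? u
      = if u = node then none else g.get? u := by
  intro u
  by_cases hc : g.contains node = true
  · rw [if_pos hc]; exact get?_erase g node u
  · rw [if_neg hc]
    by_cases hu : u = node
    · subst hu
      rw [if_pos rfl]
      exact (PySem.Dict.get?_eq_none_iff_contains g u).mpr (by simpa using hc)
    · rw [if_neg hu]

theorem attack_del_keys (g : PySem.Dict Int (PySem.Set Int)) (node : Int) :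
    (if g.contains node then g.erase node else g).keys
      = g.keys.filter (fun k => !(k == node)) := by
  by_cases hc : g.contains node = true
  · rw [if_pos hc]; exact keys_erase g node
  · rw [if_neg hc]
    refine (List.filter_eq_self.mpr ?_).symm
    intro k hk
    have : node ∉ g.keys := fun h =>
      (by simpa using hc : ¬ g.contains node = true) ((PySem.Dict.contains_iff_mem_keys g node).mpr h)
    simp only [Bool.not_eq_eq_eq_not, Bool.not_true, beq_eq_false_iff_ne, ne_eq]
    intro h; exact this (h ▸ hk)

-- the value-rewriting loop of A's attack step
theorem attackFold (node : Int) :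
    ∀ (L : List Int) (d : PySem.Dict Int (PySem.Set Int)), L.Nodup →
    (∀ k ∈ L, k ∈ d.keys) →
    ((L.foldl (fun d k =>
        if node ∈ d.getD k [] then d.insert k (PySem.Set.discard (d.getD k []) node) else d)
      d).keys = d.keys ∧
     ∀ k x, (x ∈ (L.foldl (fun d k =>
        if node ∈ d.getD k [] then d.insert k (PySem.Set.discard (d.getD k []) node) else d)
      d).getD k [] ↔ x ∈ d.getD k [] ∧ (k ∈ L → x ≠ node))) := by
  intro L
  induction L with
  | nil => intro d _ _; exact ⟨rfl, fun k x => by simp⟩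
  | cons k0 L' ih =>
    intro d hnd hsub
    set d1 := if node ∈ d.getD k0 [] then d.insert k0 (PySem.Set.discard (d.getD k0 []) node)
      else d with hd1
    have hkeys1 : d1.keys = d.keys := by
      rw [hd1]
      split
      · exact PySem.Dict.keys_insert_of_contains d _
          ((PySem.Dict.contains_iff_mem_keys d k0).mpr (hsub k0 (by simp)))
      · rfl
    have hgetD1 : ∀ j x, (x ∈ d1.getD j [] ↔ x ∈ d.getD j [] ∧ (j = k0 → x ≠ node)) := by
      intro j x
      rw [hd1]
      by_cases hv : node ∈ d.getD k0 []
      · rw [if_pos hv, PySem.Dict.getD_insert]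
        by_cases hj : j = k0
        · subst hj
          rw [if_pos rfl, PySem.Set.mem_discard]
          tauto
        · rw [if_neg hj]
          tauto
      · rw [if_neg hv]
        by_cases hj : j = k0
        · subst hj
          constructor
          · intro hx
            exact ⟨hx, fun _ hxn => hv (hxn ▸ hx)⟩
          · tauto
        · tauto
    obtain ⟨hkeys', hgetD'⟩ := ih d1 (List.nodup_cons.mp hnd).2
      (fun k hk => by rw [hkeys1]; exact hsub k (by simp [hk]))
    rw [List.foldl_cons, ← hd1]
    refine ⟨hkeys'.trans hkeys1, fun j x => ?_⟩
    rw [hgetD' j x, hgetD1 j x]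
    simp only [List.mem_cons]
    constructor
    · rintro ⟨⟨h1, h2⟩, h3⟩
      exact ⟨h1, fun h => by rcases h with h | h; exact h2 h; exact h3 h⟩
    · rintro ⟨h1, h2⟩
      exact ⟨⟨h1, fun h => h2 (Or.inl h)⟩, fun h => h2 (Or.inr h)⟩

-- one attack preserves the A↔B state invariant
theorem attack_inv (adj : PySem.Dict Int (List Int)) (g : PySem.Dict Int (PySem.Set Int))
    (dead : PySem.Set Int) (node : Int) (hka : adj.keys.Nodup) (hinv : INV adj g dead) :
    INV adj (attackStep g node) (PySem.Set.add dead node) := by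
  obtain ⟨hkeys, hgetD⟩ := hinv
  have hknd : g.keys.Nodup := by rw [hkeys]; exact hka.filter _
  set g1 := if g.contains node then g.erase node else g with hg1
  have hkeys1 : g1.keys = g.keys.filter (fun k => !(k == node)) := attack_del_keys g node
  have hknd1 : g1.keys.Nodup := by rw [hkeys1]; exact hknd.filter _
  have hget1 : ∀ u, u ≠ node → ∀ x, (x ∈ g1.getD u [] ↔ x ∈ g.getD u []) := by
    intro u hu x
    rw [PySem.Dict.getD_eq_get?_getD, PySem.Dict.getD_eq_get?_getD, attack_del_get? g node u,
      if_neg hu]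
  obtain ⟨hkeysF, hgetDF⟩ := attackFold node g1.keys g1 hknd1 (fun k hk => hk)
  constructor
  · show (attackStep g node).keys = _
    unfold attackStep
    rw [← hg1, hkeysF, hkeys1, hkeys, List.filter_filter]
    refine List.filter_congr ?_
    intro u _
    by_cases h1 : u = node
    · simp [h1, PySem.Set.mem_add]
    · by_cases h2 : u ∈ dead <;> simp [h1, h2, PySem.Set.mem_add]
  · intro u hu v
    unfold attackStep at hu ⊢
    rw [← hg1] at hu ⊢
    rw [hkeysF, hkeys1] at hu
    have humem := List.mem_filter.mp hu
    have hune : u ≠ node := by simpa using humem.2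
    have hukeys : u ∈ g.keys := humem.1
    rw [hgetDF u v]
    rw [hget1 u hune v]
    rw [hgetD u hukeys v]
    have hiff : u ∈ g1.keys := by rw [hkeys1]; exact hu
    constructor
    · rintro ⟨⟨h1, h2⟩, h3⟩
      refine ⟨h1, ?_⟩
      intro hc
      rcases (PySem.Set.mem_add dead node v).mp hc with h | h
      · exact h2 h
      · exact h3 hiff h
    · rintro ⟨h1, h2⟩
      have hvd : v ∉ dead := fun h => h2 ((PySem.Set.mem_add dead node v).mpr (Or.inl h))
      have hvn : v ≠ node := fun h => h2 ((PySem.Set.mem_add dead node v).mpr (Or.inr h))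
      exact ⟨⟨h1, hvd⟩, fun _ => hvn⟩
-- A's initial dict (set values) and B's adjacency dict (list values) agree
theorem DR_fold :
    ∀ (l : List (Int × List Int)) (d1 : PySem.Dict Int (PySem.Set Int))
      (d2 : PySem.Dict Int (List Int)),
    d1.keys = d2.keys → (∀ u x, x ∈ d1.getD u [] ↔ x ∈ d2.getD u []) →
    ((l.foldl (fun d p => d.insert p.1 (PySem.Set.ofList p.2)) d1).keys
        = (l.foldl (fun d p => d.insert p.1 p.2) d2).keys ∧
     ∀ u x, (x ∈ (l.foldl (fun d p => d.insert p.1 (PySem.Set.ofList p.2)) d1).getD u []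
        ↔ x ∈ (l.foldl (fun d p => d.insert p.1 p.2) d2).getD u [])) := by
  intro l
  induction l with
  | nil => intro d1 d2 hkeys hgetD; exact ⟨hkeys, hgetD⟩
  | cons p rest ih =>
    intro d1 d2 hkeys hgetD
    have hcont : d1.contains p.1 = d2.contains p.1 := by
      by_cases h : p.1 ∈ d1.keys
      · rw [(PySem.Dict.contains_iff_mem_keys d1 p.1).mpr h,
          ((PySem.Dict.contains_iff_mem_keys d2 p.1).mpr (hkeys ▸ h)).symm]
      · have h2 : p.1 ∉ d2.keys := fun hc => h (hkeys ▸ hc)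
        have e1 : d1.contains p.1 = false := by
          cases hc : d1.contains p.1
          · rfl
          · exact absurd ((PySem.Dict.contains_iff_mem_keys d1 p.1).mp hc) h
        have e2 : d2.contains p.1 = false := by
          cases hc : d2.contains p.1
          · rfl
          · exact absurd ((PySem.Dict.contains_iff_mem_keys d2 p.1).mp hc) h2
        rw [e1, e2]
    have hkeys' : (d1.insert p.1 (PySem.Set.ofList p.2)).keys = (d2.insert p.1 p.2).keys := by
      cases hc : d1.contains p.1
      · rw [PySem.Dict.keys_insert_of_not_contains d1 _ hc,
          PySem.Dict.keys_insert_of_not_contains d2 _ (hcont ▸ hc), hkeys]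
      · rw [PySem.Dict.keys_insert_of_contains d1 _ hc,
          PySem.Dict.keys_insert_of_contains d2 _ (hcont ▸ hc), hkeys]
    have hgetD' : ∀ u x, (x ∈ (d1.insert p.1 (PySem.Set.ofList p.2)).getD u []
        ↔ x ∈ (d2.insert p.1 p.2).getD u []) := by
      intro u x
      rw [PySem.Dict.getD_insert, PySem.Dict.getD_insert]
      by_cases hu : u = p.1
      · rw [if_pos hu, if_pos hu]
        exact PySem.Set.mem_ofList p.2 x
      · rw [if_neg hu, if_neg hu]
        exact hgetD u x
    exact ih _ _ hkeys' hgetD'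

theorem adjB_keys_nodup (ugraph : List (Int × List Int)) : (pvAdjB ugraph).keys.Nodup := by
  unfold pvAdjB
  exact PySem.Dict.nodup_keys_foldl_insert_key ugraph Prod.fst (fun _ p => p.2)
    PySem.Dict.empty PySem.Dict.nodup_keys_empty

theorem base_inv (ugraph : List (Int × List Int)) :
    INV (pvAdjB ugraph) (copyGraph (pvDictA ugraph)) PySem.Set.empty := by
  obtain ⟨hkeys, hgetD⟩ := DR_fold ugraph PySem.Dict.empty PySem.Dict.empty rfl
    (fun u x => Iff.rfl)
  have hkeysA : (pvDictA ugraph).keys = (pvAdjB ugraph).keys := hkeys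
  have hnd : (pvDictA ugraph).keys.Nodup := by rw [hkeysA]; exact adjB_keys_nodup ugraph
  constructor
  · rw [copyGraph_keys _ hnd, hkeysA]
    refine (List.filter_eq_self.mpr ?_).symm
    intro u _
    simp [PySem.Set.empty]
  · intro u hu v
    rw [copyGraph_getD_mem _ hnd u v]
    constructor
    · intro h
      exact ⟨(hgetD u v).mp h, by simp [PySem.Set.empty]⟩
    · rintro ⟨h, _⟩
      exact (hgetD u v).mpr h

-- reachability transfers between A's mutated graph and B's (adj, dead) view
theorem reach_transfer (adj : PySem.Dict Int (List Int)) (g : PySem.Dict Int (PySem.Set Int))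
    (dead : PySem.Set Int) (hinv : INV adj g dead) {s x : Int} (hs : s ∉ dead) :
    Relation.ReflTransGen (RelA g) s x ↔ Relation.ReflTransGen (RelB adj dead) s x := by
  obtain ⟨hkeys, hgetD⟩ := hinv
  have hkeymem : ∀ u, u ∈ g.keys ↔ (u ∈ adj.keys ∧ u ∉ dead) := by
    intro u
    rw [hkeys, List.mem_filter]
    simp
  constructor
  · refine Relation.ReflTransGen.mono ?_
    intro u v hr
    have hu : u ∈ g.keys := hr.1
    have h2 := (hgetD u hu v).mp hr.2
    exact ⟨((hkeymem u).mp hu).1, h2.1, h2.2⟩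
  · intro h
    suffices hsuff : x ∉ dead ∧ Relation.ReflTransGen (RelA g) s x from hsuff.2
    induction h with
    | refl => exact ⟨hs, Relation.ReflTransGen.refl⟩
    | tail hab hbc ihr =>
      rename_i b c
      obtain ⟨hbd, hrab⟩ := ihr
      have hbk : b ∈ g.keys := (hkeymem b).mpr ⟨hbc.1, hbd⟩
      have hcv : c ∈ g.getD b [] := (hgetD b hbk c).mpr ⟨hbc.2.1, hbc.2.2⟩
      exact ⟨hbc.2.2, hrab.tail ⟨hbk, hcv⟩⟩

theorem largestAlive_eq (adj : PySem.Dict Int (List Int)) (dead : PySem.Set Int) :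
    largestAlive adj dead
      = fmax 0 ((adj.keys.filter (fun u => decide (u ∉ dead))).map
          (fun u => PySem.Set.len (dfsComp adj dead u))) := by
  unfold largestAlive
  exact B_fold_inv adj dead adj.keys 0 PySem.Set.empty le_rfl
    (fun x hx => absurd hx (by simp [PySem.Set.empty]))

-- in an INV-related state the two per-step answers coincide
theorem state_eq (adj : PySem.Dict Int (List Int)) (g : PySem.Dict Int (PySem.Set Int))
    (dead : PySem.Set Int) (hka : adj.keys.Nodup) (hinv : INV adj g dead) :
    largest_cc_size g = largestAlive adj dead := by
  have hknd : g.keys.Nodup := by rw [hinv.1]; exact hka.filter _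
  rw [largest_eq g hknd, largestAlive_eq adj dead, hinv.1]
  congr 1
  refine List.map_congr_left ?_
  intro u hu
  have hmem := List.mem_filter.mp hu
  have hud : u ∉ dead := by simpa using hmem.2
  have hlen : (bfs_visited g u).length = (dfsComp adj dead u).length := by
    refine nodup_len_eq (bfs_visited_spec g hknd u).1 (dfsComp_spec adj dead u).1 ?_
    intro x
    simp only [dfsComp]
    rw [(bfs_visited_spec g hknd u).2 x, (dfsComp_spec adj dead u).2 x]
    exact reach_transfer adj g dead hinv hud
  simp only [PySem.Set.len, dfsComp] at hlen ⊢
  omega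
-- the two attack folds stay in lock-step
theorem main_fold (adj : PySem.Dict Int (List Int)) (hka : adj.keys.Nodup) :
    ∀ (ord : List Int) (g : PySem.Dict Int (PySem.Set Int)) (dead : PySem.Set Int)
      (acc : List Int), INV adj g dead →
    (ord.foldl
      (fun (st : PySem.Dict Int (PySem.Set Int) × List Int) node =>
        let g' := attackStep st.1 node
        (g', st.2 ++ [largest_cc_size g']))
      (g, acc)).2
    = (ord.foldl
      (fun (st : PySem.Set Int × List Int) node =>
        let dead := PySem.Set.add st.1 node
        (dead, st.2 ++ [largestAlive adj dead]))
      (dead, acc)).2 := by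
  intro ord
  induction ord with
  | nil => intro g dead acc _; rfl
  | cons node rest ih =>
    intro g dead acc hinv
    have hinv' : INV adj (attackStep g node) (PySem.Set.add dead node) :=
      attack_inv adj g dead node hka hinv
    have hval : largest_cc_size (attackStep g node)
        = largestAlive adj (PySem.Set.add dead node) :=
      state_eq adj (attackStep g node) (PySem.Set.add dead node) hka hinv'
    simp only [List.foldl_cons]
    rw [show (let g' := attackStep g node; (g', acc ++ [largest_cc_size g']))
        = (attackStep g node, acc ++ [largestAlive adj (PySem.Set.add dead node)]) by
      rw [← hval]]
    exact ih (attackStep g node) (PySem.Set.add dead node)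
      (acc ++ [largestAlive adj (PySem.Set.add dead node)]) hinv'

-- ===== VERDICT (by name: the statement is the Claim_ definition above) =====
theorem compute_resilience_spec : Claim_equal_compute_resilience := by
  intro ugraph attack_order _
  unfold Spec_compute_resilience compute_resilience compute_resilience_alt
  have hka : (pvAdjB ugraph).keys.Nodup := adjB_keys_nodup ugraph
  have hbase : INV (pvAdjB ugraph) (copyGraph (pvDictA ugraph)) PySem.Set.empty :=
    base_inv ugraph
  have hstart : largest_cc_size (copyGraph (pvDictA ugraph))
      = largestAlive (pvAdjB ugraph) PySem.Set.empty :=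
    state_eq (pvAdjB ugraph) (copyGraph (pvDictA ugraph)) PySem.Set.empty hka hbase
  simp only []
  rw [hstart]
  exact main_fold (pvAdjB ugraph) hka attack_order (copyGraph (pvDictA ugraph))
    PySem.Set.empty [largestAlive (pvAdjB ugraph) PySem.Set.empty] hbase
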